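-- pv_equiv track=rewrite | github.com/reporails/cli | src/reporails_cli/core/templates.py | _glob_to_regex
-- ===== SOURCE A (Python) =====
-- def _glob_to_regex(glob_pattern: str, for_yaml: bool = True) -> str:
--     """Convert a glob pattern to a regex pattern.
--
--     Handles common glob syntax:
--     - ** -> .* (match any path)
--     - * -> [^/]* (match any chars except /)
--     - . -> \\. (escape literal dot)
--     - Other special regex chars are escaped
--
--     Args:
--         glob_pattern: Glob pattern like "**/CLAUDE.md"
--         for_yaml: If True, double-escape backslashes for YAML double-quoted strings
--
--     Returns:
--         Regex pattern like ".*CLAUDE\\.md"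
--     """
--     # Remove leading **/ (matches any directory prefix)
--     pattern = glob_pattern
--     if pattern.startswith("**/"):
--         pattern = pattern[3:]
--
--     # Escape regex special chars except * and ?
--     result = ""
--     i = 0
--     while i < len(pattern):
--         c = pattern[i]
--         if c == "*":
--             if i + 1 < len(pattern) and pattern[i + 1] == "*":
--                 # ** matches anything including /
--                 result += ".*"
--                 i += 2
--                 # Skip trailing / after **
--                 if i < len(pattern) and pattern[i] == "/":
--                     i += 1
--             else:
--                 # * matches anything except /
--                 result += "[^/]*"
--                 i += 1
--         elif c == "?":
--             result += "."
--             i += 1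
--         elif c in ".^$+{}[]|()":
--             # Escape for regex, double-escape for YAML if needed
--             escape = "\\\\" if for_yaml else "\\"
--             result += escape + c
--             i += 1
--         else:
--             result += c
--             i += 1
--
--     return result
-- ===== SOURCE B (Python) =====
-- def _glob_to_regex(glob_pattern: str, for_yaml: bool = True) -> str:
--     """Glob -> regex: split on '**' and translate each plain segment char-by-char."""
--     pattern = glob_pattern[3:] if glob_pattern.startswith("**/") else glob_pattern
--     esc = "\\\\" if for_yaml else "\\"
--
--     def tr(seg):
--         return "".join(
--             "[^/]*" if c == "*" else
--             "." if c == "?" else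
--             esc + c if c in ".^$+{}[]|()" else
--             c
--             for c in seg
--         )
--
--     parts = pattern.split("**")
--     pieces = [tr(parts[0])]
--     for p in parts[1:]:
--         pieces.append(".*")
--         pieces.append(tr(p[1:] if p.startswith("/") else p))
--     return "".join(pieces)
-- ===== Notes on version B (the rewrite author's own statement) =====
-- stated objective: faster
-- what changed: Replaces A's manual index loop with lookahead and quadratic string concatenation by splitting the pattern on the double-star separator, translating each separator-free segment with a per-character mapping, and joining the pieces once.
import Mathlib
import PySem

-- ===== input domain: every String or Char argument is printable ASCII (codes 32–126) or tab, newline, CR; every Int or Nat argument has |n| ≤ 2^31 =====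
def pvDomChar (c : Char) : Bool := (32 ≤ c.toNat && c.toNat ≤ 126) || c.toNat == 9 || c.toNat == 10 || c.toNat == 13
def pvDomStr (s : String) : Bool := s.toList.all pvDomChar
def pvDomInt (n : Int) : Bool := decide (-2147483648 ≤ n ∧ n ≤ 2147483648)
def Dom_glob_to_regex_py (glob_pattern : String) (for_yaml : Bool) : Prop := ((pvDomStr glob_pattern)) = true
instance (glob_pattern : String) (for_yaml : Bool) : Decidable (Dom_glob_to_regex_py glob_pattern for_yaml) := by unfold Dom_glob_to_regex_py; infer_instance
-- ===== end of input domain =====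

-- B replaces A's manual index loop (with lookahead and repeated string concatenation) by a split on "**" plus a
-- per-character translation of each plain segment, joined once (objective: faster, measured).

-- literal constants both Pythons spell out: the special-char set ".^$+{}[]|()" and the escape string
def pvSpecials : List Char := ['.', '^', '$', '+', '{', '}', '[', ']', '|', '(', ')']
def pvEsc (for_yaml : Bool) : List Char := if for_yaml then ['\\', '\\'] else ['\\']

-- ===== PORT A =====
-- A's while loop over index i, one step per character with lookahead pattern[i+1] / pattern[i+2];
-- ported as recursion on the remaining character list (head = pattern[i], rest.head? = pattern[i+1]).
def pvLoopA (for_yaml : Bool) : List Char → List Char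
  | [] => []
  | c :: rest =>
    if c = '*' then
      if rest.head? = some '*' then
        -- "** matches anything including /", then skip one trailing '/'
        if rest.tail.head? = some '/' then ['.', '*'] ++ pvLoopA for_yaml rest.tail.tail
        else ['.', '*'] ++ pvLoopA for_yaml rest.tail
      else ['[', '^', '/', ']', '*'] ++ pvLoopA for_yaml rest
    else if c = '?' then '.' :: pvLoopA for_yaml rest
    else if c ∈ pvSpecials then pvEsc for_yaml ++ [c] ++ pvLoopA for_yaml rest
    else c :: pvLoopA for_yaml rest
termination_by l => l.length
decreasing_by all_goals (simp only [List.length_tail, List.length_cons]; omega)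

def glob_to_regex_py (glob_pattern : String) (for_yaml : Bool) : String :=
  let cs := glob_pattern.toList
  -- pattern = pattern[3:] if pattern.startswith("**/")  (slice [3:] with nonnegative index = drop 3, exact)
  let pat := if PySem.Chars.startswith cs ['*', '*', '/'] then cs.drop 3 else cs
  String.mk (pvLoopA for_yaml pat)

-- ===== PORT B =====
-- per-character translation of a '**'-free segment ("".join over a generator → flatMap)
def pvTrB (esc : List Char) (seg : List Char) : List Char :=
  seg.flatMap (fun c =>
    if c = '*' then ['[', '^', '/', ']', '*']
    else if c = '?' then ['.']
    else if c ∈ pvSpecials then esc ++ [c]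
    else [c])

def glob_to_regex_py_alt (glob_pattern : String) (for_yaml : Bool) : String :=
  let cs := glob_pattern.toList
  -- pattern = glob_pattern[3:] if glob_pattern.startswith("**/") else glob_pattern  (nonnegative slice = drop, exact)
  let pat := if PySem.Chars.startswith cs ['*', '*', '/'] then cs.drop 3 else cs
  let esc := pvEsc for_yaml
  let parts := PySem.Chars.splitOn pat ['*', '*']   -- pattern.split("**"); never the empty list
  -- pieces = [tr(parts[0])] then ".*", tr(p[1:] if p.startswith("/") else p) for each later part; "".join
  String.mk (pvTrB esc (parts.headD []) ++
    (parts.drop 1).flatMap (fun p =>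
      ['.', '*'] ++ pvTrB esc (if PySem.Chars.startswith p ['/'] then p.drop 1 else p)))

-- ===== PRECONDITION & SPEC =====
def Spec_glob_to_regex_py (glob_pattern : String) (for_yaml : Bool) (out : String) : Prop := out = glob_to_regex_py_alt glob_pattern for_yaml
instance (glob_pattern : String) (for_yaml : Bool) (out : String) : Decidable (Spec_glob_to_regex_py glob_pattern for_yaml out) := by unfold Spec_glob_to_regex_py; infer_instance

-- ===== CLAIM (what is proved, stated in full; the proofs are below) =====
def Claim_equal_glob_to_regex_py : Prop := ∀ (glob_pattern : String) (for_yaml : Bool), Dom_glob_to_regex_py glob_pattern for_yaml → Spec_glob_to_regex_py glob_pattern for_yaml (glob_to_regex_py glob_pattern for_yaml)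

-- ===== LEMMAS AND PROOFS =====

-- proof-side structural characterisation of pattern.split("**"): (first segment, later segments)
def pvSp : List Char → List Char × List (List Char)
  | [] => ([], [])
  | c :: rest =>
    if c = '*' ∧ rest.head? = some '*' then
      ([], (pvSp rest.tail).1 :: (pvSp rest.tail).2)
    else (c :: (pvSp rest).1, (pvSp rest).2)
termination_by l => l.length
decreasing_by all_goals (simp only [List.length_tail, List.length_cons]; omega)

theorem pv_go_eq : ∀ (fuel : Nat) (l cur : List Char) (acc : List (List Char)),
    l.length < fuel →
    PySem.Chars.splitOn.go ['*', '*'] fuel l cur acc =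
      acc.reverse ++ (cur.reverse ++ (pvSp l).1) :: (pvSp l).2 := by
  intro fuel
  induction fuel with
  | zero => intro l cur acc h; omega
  | succ n ih =>
    intro l cur acc h
    cases l with
    | nil =>
      rw [PySem.Chars.splitOn.go]
      · simp [pvSp]
      · omega
    | cons c rest =>
      rw [PySem.Chars.splitOn.go]
      by_cases hp : ['*', '*'].isPrefixOf (c :: rest) = true
      · cases rest with
        | nil => simp [List.isPrefixOf] at hp
        | cons c2 r2 =>
          simp only [List.isPrefixOf, Bool.and_true, Bool.and_eq_true, beq_iff_eq] at hp
          rw [if_pos (by simp only [List.isPrefixOf, Bool.and_true, Bool.and_eq_true, beq_iff_eq]; exact hp)]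
          rw [ih _ _ _ (by simp at h ⊢; omega)]
          rw [pvSp, if_pos (by simp [hp.1.symm, hp.2.symm])]
          simp
      · have hc : ¬ (c = '*' ∧ rest.head? = some '*') := by
          cases rest with
          | nil => simp
          | cons c2 r2 =>
            simp only [List.isPrefixOf, Bool.and_true, Bool.and_eq_true, beq_iff_eq, not_and] at hp
            simp only [List.head?_cons, Option.some.injEq, not_and]
            intro h1 h2; exact hp h1.symm h2.symm
        rw [if_neg hp, ih _ _ _ (by simp at h ⊢; omega)]
        rw [pvSp, if_neg hc]
        simp

theorem pv_splitOn_eq (l : List Char) :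
    PySem.Chars.splitOn l ['*', '*'] = (pvSp l).1 :: (pvSp l).2 := by
  rw [PySem.Chars.splitOn, pv_go_eq _ _ _ _ (by omega)]
  simp

theorem pv_sw_slash (p : List Char) : PySem.Chars.startswith p ['/'] = true ↔ p.head? = some '/' := by
  cases p <;> simp [PySem.Chars.startswith, List.isPrefixOf]
  exact eq_comm

theorem pv_sp_head (l : List Char) (h : l.head? ≠ some '/') :
    (pvSp l).1.head? ≠ some '/' := by
  cases l with
  | nil => simp [pvSp]
  | cons c rest =>
    rw [pvSp]
    split
    · simp
    · simpa using h

theorem pv_main (y : Bool) (l : List Char) :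
    pvLoopA y l =
      pvTrB (pvEsc y) (pvSp l).1 ++
        (pvSp l).2.flatMap (fun p =>
          ['.', '*'] ++ pvTrB (pvEsc y) (if PySem.Chars.startswith p ['/'] then p.drop 1 else p)) := by
  cases l with
  | nil => simp [pvLoopA, pvSp, pvTrB]
  | cons c rest =>
    rw [pvLoopA, pvSp]
    by_cases hc : c = '*'
    · by_cases h2 : rest.head? = some '*'
      · rw [if_pos hc, if_pos h2, if_pos (show c = '*' ∧ rest.head? = some '*' from ⟨hc, h2⟩)]
        by_cases h3 : rest.tail.head? = some '/'
        · rw [if_pos h3, pv_main y rest.tail.tail]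
          obtain ⟨r1, rest2, rfl⟩ : ∃ r1 rest2, rest = r1 :: rest2 := by
            cases rest with
            | nil => simp at h2
            | cons a b => exact ⟨a, b, rfl⟩
          obtain ⟨rest3, rfl⟩ : ∃ rest3, rest2 = '/' :: rest3 := by
            cases rest2 with
            | nil => simp at h3
            | cons a b => simp at h3; exact ⟨b, by rw [h3]⟩
          have hsp : pvSp ('/' :: rest3) = ('/' :: (pvSp rest3).1, (pvSp rest3).2) := by
            rw [pvSp]; simp
          simp [hsp, pvTrB, pv_sw_slash]
        · rw [if_neg h3, pv_main y rest.tail]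
          have hsw : PySem.Chars.startswith (pvSp rest.tail).1 ['/'] = false := by
            rw [Bool.eq_false_iff]
            intro hh
            exact pv_sp_head rest.tail h3 ((pv_sw_slash _).mp hh)
          simp [pvTrB, hsw]
      · rw [if_pos hc, if_neg h2, if_neg (show ¬(c = '*' ∧ rest.head? = some '*') from fun h => h2 h.2)]
        rw [pv_main y rest]
        subst hc
        simp [pvTrB]
    · rw [if_neg hc, if_neg (show ¬(c = '*' ∧ rest.head? = some '*') from fun h => hc h.1)]
      by_cases hq : c = '?'
      · rw [if_pos hq, pv_main y rest]
        subst hq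
        simp [pvTrB]
      · rw [if_neg hq]
        by_cases hs : c ∈ pvSpecials
        · rw [if_pos hs, pv_main y rest]
          simp [pvTrB, hs, hc, hq]
        · rw [if_neg hs, pv_main y rest]
          simp [pvTrB, hs, hc, hq]
termination_by l.length
decreasing_by all_goals (simp only [List.length_tail, List.length_cons]; omega)

-- ===== VERDICT (by name: the statement is the Claim_ definition above) =====
theorem glob_to_regex_py_spec : Claim_equal_glob_to_regex_py := by
  intro g y _
  unfold Spec_glob_to_regex_py glob_to_regex_py glob_to_regex_py_alt
  simp only [pv_splitOn_eq, List.headD_cons, List.drop_succ_cons, List.drop_zero]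
  rw [pv_main]
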